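-- pv_equiv track=rewrite | github.com/Dimash357/Django_main | django-homework_20.02.2023/django-algoritms/main.py | second_algoritm
-- ===== SOURCE A (Python) =====
-- def second_algoritm(list1):
--     list1.sort()
--     start = end = list1[0]
--     result = ""
--     for i in range(1, len(list1)):
--         if list1[i] == end + 1:
--             end = list1[i]
--         else:
--             if start == end:
--                 result += str(start) + ","
--             else:
--                 result += str(start) + "-" + str(end) + ","
--             start = end = list1[i]
--     if start == end:
--         result += str(start)
--     else:
--         result += str(start) + "-" + str(end)
--     return result
-- ===== SOURCE B (Python) =====
-- def second_algoritm(list1):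
--     # Sorts in place like A; then stateless staged passes: boundary detection by
--     # zipping adjacent pairs (a run break is where next != prev + 1), giving the
--     # run starts and run ends as two comprehensions, zipped and formatted.
--     list1.sort()
--     breaks = [(a, b) for a, b in zip(list1, list1[1:]) if b != a + 1]
--     starts = [list1[0]] + [b for a, b in breaks]
--     ends = [a for a, b in breaks] + [list1[-1]]
--     return ",".join(str(a) if a == b else str(a) + "-" + str(b)
--                     for a, b in zip(starts, ends))
-- ===== Notes on version B (the rewrite author's own statement) =====
-- stated objective: alternative
-- what changed: A is one stateful online loop mutating start/end and concatenating pieces with trailing commas into a growing string, with duplicated emit code after the loop; B is stateless staged passes: zip adjacent pairs of the sorted list to find run breaks, build the run-starts and run-ends lists from them, zip the two and format, then ','.join.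
import Mathlib
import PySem

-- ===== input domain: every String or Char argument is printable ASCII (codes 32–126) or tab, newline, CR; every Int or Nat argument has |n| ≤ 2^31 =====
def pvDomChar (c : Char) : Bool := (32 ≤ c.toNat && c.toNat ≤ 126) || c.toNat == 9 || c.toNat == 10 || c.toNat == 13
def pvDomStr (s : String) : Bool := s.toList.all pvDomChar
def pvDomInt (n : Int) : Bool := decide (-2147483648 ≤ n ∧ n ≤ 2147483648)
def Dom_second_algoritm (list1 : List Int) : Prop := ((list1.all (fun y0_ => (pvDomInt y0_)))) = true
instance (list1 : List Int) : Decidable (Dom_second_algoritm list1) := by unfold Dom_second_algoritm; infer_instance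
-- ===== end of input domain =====

-- B replaces A's stateful online loop (mutable start/end, string concatenation with trailing
-- commas, duplicated emit code after the loop) by stateless staged passes: zip adjacent pairs of
-- the sorted list to find run breaks, derive the run starts and run ends lists, zip and format,
-- join with commas (alternative decomposition, same cost). Both Pythons sort list1 in place; the
-- equivalence proved is about the return value (the mutation is identical anyway).

-- ===== PORT A =====
-- A's for-loop over indices 1..len-1, as recursion over the tail with state (start, e, result)
def loopA (start e : Int) (result : String) : List Int → String
  | [] =>
    if start = e then result ++ PySem.Int.toStr start
    else result ++ PySem.Int.toStr start ++ "-" ++ PySem.Int.toStr e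
  | v :: rest =>
    if v = e + 1 then loopA start v result rest
    else if start = e then loopA v v (result ++ PySem.Int.toStr start ++ ",") rest
    else loopA v v (result ++ PySem.Int.toStr start ++ "-" ++ PySem.Int.toStr e ++ ",") rest

def second_algoritm (list1 : List Int) : String :=
  match PySem.List.sorted list1 (fun x => x) false with
  | [] => ""            -- Python A raises IndexError at list1[0]; excluded by Pre_
  | x :: xs => loopA x x "" xs

-- ===== PORT B =====
-- str(a) if a == b else str(a) + "-" + str(b)
def fmtRange (a b : Int) : String :=
  if a = b then PySem.Int.toStr a else PySem.Int.toStr a ++ "-" ++ PySem.Int.toStr b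

def second_algoritm_alt (list1 : List Int) : String :=
  match PySem.List.sorted list1 (fun x => x) false with
  | [] => ""            -- Python B raises IndexError at list1[0]; excluded by Pre_
  | x :: xs =>
    let breaks := (List.zip (x :: xs) xs).filter (fun p => decide (p.2 ≠ p.1 + 1))
    let starts := x :: breaks.map Prod.snd
    let ends := breaks.map Prod.fst ++ [(x :: xs).getLast (List.cons_ne_nil x xs)]
    PySem.Str.join "," ((List.zip starts ends).map (fun p => fmtRange p.1 p.2))

-- ===== PRECONDITION & SPEC =====
-- Pre_ excludes only the empty list, on which both A and B raise IndexError (list1[0]).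
def Pre_second_algoritm (list1 : List Int) : Prop := list1 ≠ []
instance (list1 : List Int) : Decidable (Pre_second_algoritm list1) := by unfold Pre_second_algoritm; infer_instance
def pvWitness_second_algoritm : List Int := ([1, 2, 5])

def Spec_second_algoritm (list1 : List Int) (out : String) : Prop := out = second_algoritm_alt list1
instance (list1 : List Int) (out : String) : Decidable (Spec_second_algoritm list1 out) := by unfold Spec_second_algoritm; infer_instance

-- ===== CLAIM (what is proved, stated in full; the proofs are below) =====
def Claim_equal_second_algoritm : Prop := ∀ (list1 : List Int), Dom_second_algoritm list1 → Pre_second_algoritm list1 → Spec_second_algoritm list1 (second_algoritm list1)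

-- ===== LEMMAS AND PROOFS =====

-- proof-only: the maximal consecutive run starting at prev: its last element and the rest
def takeRun : Int → List Int → Int × List Int
  | prev, [] => (prev, [])
  | prev, y :: ys => if y = prev + 1 then takeRun y ys else (prev, y :: ys)

theorem takeRun_snd_length : ∀ (xs : List Int) (prev : Int), (takeRun prev xs).2.length ≤ xs.length := by
  intro xs
  induction xs with
  | nil => intro prev; simp [takeRun]
  | cons y ys ih =>
    intro prev
    by_cases h : y = prev + 1
    · simp only [takeRun, if_pos h]
      exact Nat.le_succ_of_le (ih y)
    · simp [takeRun, if_neg h]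

-- proof-only: the canonical run decomposition, one formatted part per run
def runsParts : List Int → List String
  | [] => []
  | z :: zs => fmtRange z (takeRun z zs).1 :: runsParts (takeRun z zs).2
termination_by l => l.length
decreasing_by
  exact Nat.lt_succ_of_le (takeRun_snd_length zs z)

-- proof-only names for B's let-bound intermediates (definitionally equal to them)
def breaksOf (x : Int) (xs : List Int) : List (Int × Int) :=
  (List.zip (x :: xs) xs).filter (fun p => decide (p.2 ≠ p.1 + 1))

def endsOf (x : Int) (xs : List Int) : List Int :=
  (breaksOf x xs).map Prod.fst ++ [(x :: xs).getLast (List.cons_ne_nil x xs)]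

theorem join_comma_singleton (a : String) : PySem.Str.join "," [a] = a := by
  apply String.toList_injective ?_
  simp [PySem.Str.toList_join, PySem.Chars.join_singleton]

theorem join_comma_cons_cons (a b : String) (l : List String) :
    PySem.Str.join "," (a :: b :: l) = a ++ "," ++ PySem.Str.join "," (b :: l) := by
  apply String.toList_injective ?_
  simp [PySem.Str.toList_join, PySem.Chars.join_cons_cons]

theorem runsParts_cons (z : Int) (zs : List Int) :
    runsParts (z :: zs) = fmtRange z (takeRun z zs).1 :: runsParts (takeRun z zs).2 := by
  rw [runsParts]

-- A's loop computes the comma-join of the run decomposition, appended to the accumulator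
theorem loopA_eq : ∀ (rest : List Int) (lo e : Int) (res : String),
    loopA lo e res rest =
      res ++ PySem.Str.join ","
        (fmtRange lo (takeRun e rest).1 :: runsParts (takeRun e rest).2) := by
  intro rest
  induction rest with
  | nil =>
    intro lo e res
    simp only [loopA, takeRun, runsParts, join_comma_singleton]
    by_cases h : lo = e <;> simp [fmtRange, h, String.append_assoc]
  | cons v vs ih =>
    intro lo e res
    by_cases hv : v = e + 1
    · simp only [loopA, takeRun, if_pos hv]
      exact ih lo v res
    · simp only [loopA, takeRun, if_neg hv]
      rw [runsParts_cons, join_comma_cons_cons]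
      by_cases h : lo = e
      · simp only [if_pos h]
        rw [ih v v (res ++ PySem.Int.toStr lo ++ ",")]
        simp [fmtRange, h, String.append_assoc]
      · simp only [if_neg h]
        rw [ih v v (res ++ PySem.Int.toStr lo ++ "-" ++ PySem.Int.toStr e ++ ",")]
        simp [fmtRange, h, String.append_assoc]

-- B's zipped starts/ends pipeline also computes the run decomposition (head start generalized to c)
theorem zipParts_eq : ∀ (xs : List Int) (x c : Int),
    (List.zip (c :: (breaksOf x xs).map Prod.snd) (endsOf x xs)).map (fun p => fmtRange p.1 p.2) =
      fmtRange c (takeRun x xs).1 :: runsParts (takeRun x xs).2 := by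
  intro xs
  induction xs with
  | nil => intro x c; simp [breaksOf, endsOf, takeRun, runsParts]
  | cons y ys ih =>
    intro x c
    by_cases h : y = x + 1
    · have hb : breaksOf x (y :: ys) = breaksOf y ys := by
        simp [breaksOf, List.zip_cons_cons, h]
      have he : endsOf x (y :: ys) = endsOf y ys := by
        simp [endsOf, hb, List.getLast_cons]
      have ht : takeRun x (y :: ys) = takeRun y ys := by simp [takeRun, h]
      rw [hb, he, ht]
      exact ih y c
    · have hb : breaksOf x (y :: ys) = (x, y) :: breaksOf y ys := by
        simp [breaksOf, List.zip_cons_cons, h]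
      have he : endsOf x (y :: ys) = x :: endsOf y ys := by
        simp [endsOf, hb, List.getLast_cons]
      have ht : takeRun x (y :: ys) = (x, y :: ys) := by simp [takeRun, h]
      rw [hb, he, ht, runsParts_cons]
      simp only [List.map_cons, List.zip_cons_cons, List.map]
      rw [ih y y]

-- ===== VERDICT (by name: the statement is the Claim_ definition above) =====
theorem second_algoritm_spec : Claim_equal_second_algoritm := by
  intro list1 _hdom hpre
  unfold Spec_second_algoritm second_algoritm second_algoritm_alt
  cases hs : PySem.List.sorted list1 (fun x => x) false with
  | nil =>
    exfalso
    apply hpre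
    have := PySem.List.length_sorted (xs := list1) (key := fun x => x) (rev := false)
    rw [hs] at this
    exact List.eq_nil_of_length_eq_zero this.symm
  | cons x xs =>
    show loopA x x "" xs =
      PySem.Str.join ","
        ((List.zip (x :: (breaksOf x xs).map Prod.snd) (endsOf x xs)).map (fun p => fmtRange p.1 p.2))
    rw [zipParts_eq xs x x, loopA_eq xs x x ""]
    simp
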